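-- pv_equiv track=rewrite | github.com/calimero-network/ai-code-reviewer | src/ai_reviewer/docs/analyzer.py | _has_new_top_level_dir
-- ===== SOURCE A (Python) =====
-- def _has_new_top_level_dir(
--     changed_paths_with_status: dict[str, str],
--     existing_repo_paths: set[str],
-- ) -> bool:
--     """True if any added file introduces a genuinely new top-level directory.
--
--     Uses *existing_repo_paths* (probed from the repo) to know which
--     directories already exist, avoiding false positives when a PR only adds
--     files to an existing directory without modifying other files there.
--     """
--     known_dirs: set[str] = set()
--     for p in existing_repo_paths:
--         stripped = p.rstrip("/")
--         if "/" not in stripped: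
--             known_dirs.add(stripped)
--
--     for path, status in changed_paths_with_status.items():
--         parts = path.split("/")
--         if len(parts) < 2:
--             continue
--         top = parts[0]
--         if status != "added":
--             known_dirs.add(top)
--
--     for path, status in changed_paths_with_status.items():
--         parts = path.split("/")
--         if len(parts) < 2:
--             continue
--         if status == "added" and parts[0] not in known_dirs:
--             return True
--     return False
-- ===== SOURCE B (Python) =====
-- def _has_new_top_level_dir(
--     changed_paths_with_status: dict[str, str],
--     existing_repo_paths: set[str],
-- ) -> bool:
--     """Group the changed paths by their top-level segment into one verdict
--     dict (top -> 'every change under it is an addition'), instead of tracking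
--     known-directory sets: a top is new exactly when its aggregated verdict is
--     True and it is not already a top-level entry of the repo."""
--     verdict: dict[str, bool] = {}
--     for path, status in changed_paths_with_status.items():
--         parts = path.split("/")
--         if len(parts) > 1:
--             verdict[parts[0]] = verdict.get(parts[0], True) and status == "added"
--     existing_tops = {p.rstrip("/") for p in existing_repo_paths if "/" not in p.rstrip("/")}
--     return any(v for top, v in verdict.items() if top not in existing_tops)
-- ===== Notes on version B (the rewrite author's own statement) =====
-- stated objective: alternative
-- what changed: Replaces A's known-directory sets (built in two passes, then an early-return membership scan) by a per-top-level-directory boolean aggregation: one dict folds 'and status==added' over each top's changes, and the answer is any() over that dict's entries not already top-level in the repo.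
import Mathlib
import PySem

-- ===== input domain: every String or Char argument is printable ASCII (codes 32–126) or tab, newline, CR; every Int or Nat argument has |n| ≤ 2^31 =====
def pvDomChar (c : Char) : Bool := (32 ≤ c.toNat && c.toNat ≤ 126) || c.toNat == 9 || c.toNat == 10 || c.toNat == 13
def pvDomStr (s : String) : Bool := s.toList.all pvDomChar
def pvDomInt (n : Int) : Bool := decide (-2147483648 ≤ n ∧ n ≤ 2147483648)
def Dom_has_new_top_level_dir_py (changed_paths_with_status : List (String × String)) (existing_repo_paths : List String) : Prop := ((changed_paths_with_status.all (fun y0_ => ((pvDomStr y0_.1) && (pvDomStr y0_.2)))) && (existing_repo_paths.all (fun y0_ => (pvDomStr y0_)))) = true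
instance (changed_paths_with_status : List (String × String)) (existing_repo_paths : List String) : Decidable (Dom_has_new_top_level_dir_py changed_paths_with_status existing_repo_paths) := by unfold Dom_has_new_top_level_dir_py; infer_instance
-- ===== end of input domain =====

-- B drops A's known-directory sets for a per-top boolean aggregation dict ('every change under this top is an addition') finished by any(); objective: alternative.

-- ===== PORT A =====
-- p.rstrip("/"), ported by hand: drops exactly the trailing '/' characters (exact for a one-char strip set)
-- path.split("/"), ported by hand via the Chars primitive (exact; bridge to String)
def pvSplitSlash (s : String) : List String :=
  (PySem.Chars.splitOn s.toList "/".toList).map String.ofList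

def pvRstripSlash (s : String) : String :=
  String.ofList ((s.toList.reverse.dropWhile (fun c => c == '/')).reverse)

-- the second 'for' loop of A, with its early 'return True'
def pvGoA : List (String × String) → PySem.Set String → Bool
  | [], _ => false
  | (p, s) :: rest, known_dirs =>
      let parts := pvSplitSlash p
      if parts.length < 2 then pvGoA rest known_dirs
      else if s == "added" && !(PySem.Set.contains known_dirs ((PySem.List.pyGet? parts 0).getD "")) then true
      else pvGoA rest known_dirs

def has_new_top_level_dir_py (changed_paths_with_status : List (String × String)) (existing_repo_paths : List String) : Bool :=
  -- first loop: existing top-level entries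
  let known_dirs : PySem.Set String := existing_repo_paths.foldl (fun kd p =>
      let stripped := pvRstripSlash p
      if PySem.Str.isIn "/" stripped then kd else PySem.Set.add kd stripped) PySem.Set.empty
  let items := (PySem.Dict.ofList changed_paths_with_status).items
  -- second loop: tops of non-added changed paths
  let known_dirs := items.foldl (fun kd (pv : String × String) =>
      let parts := pvSplitSlash pv.1
      if parts.length < 2 then kd
      else if pv.2 != "added" then PySem.Set.add kd ((PySem.List.pyGet? parts 0).getD "") else kd) known_dirs
  -- third loop with early return
  pvGoA items known_dirs

-- ===== PORT B =====
def has_new_top_level_dir_py_alt (changed_paths_with_status : List (String × String)) (existing_repo_paths : List String) : Bool :=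
  -- the aggregation loop: verdict[top] = verdict.get(top, True) and status == "added"
  let verdict : PySem.Dict String Bool :=
    ((PySem.Dict.ofList changed_paths_with_status).items).foldl
      (fun d (pv : String × String) =>
        let parts := pvSplitSlash pv.1
        if 1 < parts.length then
          let top := (PySem.List.pyGet? parts 0).getD ""
          d.insert top (d.getD top true && pv.2 == "added")
        else d)
      PySem.Dict.empty
  -- set comprehension over the existing paths
  let existing_tops : PySem.Set String :=
    PySem.Set.ofList ((existing_repo_paths.filter
        (fun p => !(PySem.Str.isIn "/" (pvRstripSlash p)))).map pvRstripSlash)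
  -- any(v for top, v in verdict.items() if top not in existing_tops)
  verdict.items.any (fun kv => !(PySem.Set.contains existing_tops kv.1) && kv.2)

-- ===== PRECONDITION & SPEC =====
def Spec_has_new_top_level_dir_py (changed_paths_with_status : List (String × String)) (existing_repo_paths : List String) (out : Bool) : Prop := out = has_new_top_level_dir_py_alt changed_paths_with_status existing_repo_paths
instance (changed_paths_with_status : List (String × String)) (existing_repo_paths : List String) (out : Bool) : Decidable (Spec_has_new_top_level_dir_py changed_paths_with_status existing_repo_paths out) := by unfold Spec_has_new_top_level_dir_py; infer_instance

-- ===== CLAIM (what is proved, stated in full; the proofs are below) =====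
def Claim_equal_has_new_top_level_dir_py : Prop := ∀ (changed_paths_with_status : List (String × String)) (existing_repo_paths : List String), Dom_has_new_top_level_dir_py changed_paths_with_status existing_repo_paths → Spec_has_new_top_level_dir_py changed_paths_with_status existing_repo_paths (has_new_top_level_dir_py changed_paths_with_status existing_repo_paths)

-- ===== LEMMAS AND PROOFS =====

-- top-level segment of a slashed path (proof-side abbreviation)
def pvTop (p : String) : String := (PySem.List.pyGet? (pvSplitSlash p) 0).getD ""

-- A's early-return loop is an existence test
theorem pvGoA_iff (items : List (String × String)) (known : PySem.Set String) :
    pvGoA items known = true ↔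
      ∃ pv ∈ items, 2 ≤ (pvSplitSlash pv.1).length ∧ pv.2 = "added" ∧ pvTop pv.1 ∉ known := by
  induction items with
  | nil => simp [pvGoA]
  | cons hd tl ih =>
    obtain ⟨p, s⟩ := hd
    simp only [pvGoA, pvTop]
    split_ifs with h1 h2
    · rw [ih]
      constructor
      · rintro ⟨pv, hm, hpv⟩; exact ⟨pv, by simp [hm], hpv⟩
      · rintro ⟨pv, hm, hpv⟩
        rcases List.mem_cons.mp hm with rfl | hm
        · exact absurd (show 2 ≤ (pvSplitSlash p).length from hpv.1) (by omega)
        · exact ⟨pv, hm, hpv⟩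
    · simp only [Bool.and_eq_true, beq_iff_eq, Bool.not_eq_true'] at h2
      constructor
      · intro _
        refine ⟨(p, s), List.mem_cons_self .., show 2 ≤ (pvSplitSlash p).length by omega, h2.1, ?_⟩
        simpa [PySem.Set.contains_iff] using h2.2
      · intro _; rfl
    · rw [ih]
      simp only [Bool.and_eq_true, beq_iff_eq, Bool.not_eq_true'] at h2
      constructor
      · rintro ⟨pv, hm, hpv⟩; exact ⟨pv, by simp [hm], hpv⟩
      · rintro ⟨pv, hm, hpv⟩
        rcases List.mem_cons.mp hm with rfl | hm
        · exfalso
          rcases hpv with ⟨hl, hs, hnm⟩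
          rcases Bool.eq_false_or_eq_true (PySem.Set.contains known ((PySem.List.pyGet? (pvSplitSlash p) 0).getD "")) with hc | hc
          · exact hnm (by simpa [PySem.Set.contains_iff] using hc)
          · exact h2 ⟨hs, hc⟩
        · exact ⟨pv, hm, hpv⟩

-- membership after A's pass over changed paths (non-added tops)
theorem pv_mem_knownChanged (items : List (String × String)) (k : PySem.Set String) (x : String) :
    x ∈ items.foldl (fun kd (pv : String × String) =>
        let parts := pvSplitSlash pv.1
        if parts.length < 2 then kd
        else if pv.2 != "added" then PySem.Set.add kd ((PySem.List.pyGet? parts 0).getD "") else kd) k ↔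
      x ∈ k ∨ ∃ pv ∈ items, 2 ≤ (pvSplitSlash pv.1).length ∧ pv.2 ≠ "added" ∧ x = pvTop pv.1 := by
  induction items generalizing k with
  | nil => simp
  | cons hd tl ih =>
    obtain ⟨p, s⟩ := hd
    simp only [List.foldl_cons]
    rw [ih]
    split_ifs with h1 h2
    · constructor
      · rintro (h | ⟨pv, hm, hpv⟩)
        · exact Or.inl h
        · exact Or.inr ⟨pv, by simp [hm], hpv⟩
      · rintro (h | ⟨pv, hm, hpv⟩)
        · exact Or.inl h
        · rcases List.mem_cons.mp hm with rfl | hm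
          · exact absurd (show 2 ≤ (pvSplitSlash p).length from hpv.1) (by omega)
          · exact Or.inr ⟨pv, hm, hpv⟩
    · simp only [bne_iff_ne, ne_eq] at h2
      rw [PySem.Set.mem_add]
      constructor
      · rintro ((h | h) | ⟨pv, hm, hpv⟩)
        · exact Or.inl h
        · exact Or.inr ⟨(p, s), List.mem_cons_self .., show 2 ≤ (pvSplitSlash p).length by omega, h2, by simpa [pvTop] using h⟩
        · exact Or.inr ⟨pv, by simp [hm], hpv⟩
      · rintro (h | ⟨pv, hm, hpv⟩)
        · exact Or.inl (Or.inl h)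
        · rcases List.mem_cons.mp hm with rfl | hm
          · exact Or.inl (Or.inr (by simpa [pvTop] using hpv.2.2))
          · exact Or.inr ⟨pv, hm, hpv⟩
    · simp only [bne_iff_ne, ne_eq, not_not] at h2
      constructor
      · rintro (h | ⟨pv, hm, hpv⟩)
        · exact Or.inl h
        · exact Or.inr ⟨pv, by simp [hm], hpv⟩
      · rintro (h | ⟨pv, hm, hpv⟩)
        · exact Or.inl h
        · rcases List.mem_cons.mp hm with rfl | hm
          · exact absurd h2 hpv.2.1
          · exact Or.inr ⟨pv, hm, hpv⟩

-- membership after the existing-paths loop of A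
theorem pv_mem_knownExisting (paths : List String) (k : PySem.Set String) (x : String) :
    x ∈ paths.foldl (fun kd p =>
        let stripped := pvRstripSlash p
        if PySem.Str.isIn "/" stripped then kd else PySem.Set.add kd stripped) k ↔
      x ∈ k ∨ ∃ p ∈ paths, ¬ PySem.Str.isIn "/" (pvRstripSlash p) = true ∧ x = pvRstripSlash p := by
  induction paths generalizing k with
  | nil => simp
  | cons hd tl ih =>
    simp only [List.foldl_cons]
    rw [ih]
    split_ifs with h1
    · constructor
      · rintro (h | ⟨p, hm, hp⟩)
        · exact Or.inl h
        · exact Or.inr ⟨p, by simp [hm], hp⟩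
      · rintro (h | ⟨p, hm, hp⟩)
        · exact Or.inl h
        · rcases List.mem_cons.mp hm with rfl | hm
          · exact absurd h1 hp.1
          · exact Or.inr ⟨p, hm, hp⟩
    · rw [PySem.Set.mem_add]
      constructor
      · rintro ((h | h) | ⟨p, hm, hp⟩)
        · exact Or.inl h
        · exact Or.inr ⟨hd, List.mem_cons_self .., h1, h⟩
        · exact Or.inr ⟨p, by simp [hm], hp⟩
      · rintro (h | ⟨p, hm, hp⟩)
        · exact Or.inl (Or.inl h)
        · rcases List.mem_cons.mp hm with rfl | hm
          · exact Or.inl (Or.inr hp.2)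
          · exact Or.inr ⟨p, hm, hp⟩

-- B's existing_tops set, membership
theorem pv_mem_existingTops (paths : List String) (x : String) :
    x ∈ PySem.Set.ofList ((paths.filter
        (fun p => !(PySem.Str.isIn "/" (pvRstripSlash p)))).map pvRstripSlash) ↔
      ∃ p ∈ paths, ¬ PySem.Str.isIn "/" (pvRstripSlash p) = true ∧ x = pvRstripSlash p := by
  rw [PySem.Set.mem_ofList]
  constructor
  · intro h
    obtain ⟨p, hp, rfl⟩ := List.mem_map.mp h
    obtain ⟨hm, hc⟩ := List.mem_filter.mp hp
    exact ⟨p, hm, by simpa using hc, rfl⟩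
  · rintro ⟨p, hm, hc, rfl⟩
    exact List.mem_map.mpr ⟨p, List.mem_filter.mpr ⟨hm, by simpa using hc⟩, rfl⟩

-- value of B's verdict dict at a key: the conjunction over that key's entries
theorem pv_getD_verdict (l : List (String × String)) (d : PySem.Dict String Bool) (t : String) :
    (l.foldl (fun d (pv : String × String) =>
        d.insert (pvTop pv.1) (d.getD (pvTop pv.1) true && pv.2 == "added")) d).getD t true
      = (d.getD t true && (l.filter (fun pv => pvTop pv.1 == t)).all (fun pv => pv.2 == "added")) := by
  induction l generalizing d with
  | nil => simp
  | cons hd tl ih =>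
    simp only [List.foldl_cons, ih, List.filter_cons]
    by_cases h : pvTop hd.1 = t
    · simp [h, Bool.and_assoc, Bool.and_comm ((hd.2 == "added"))]
    · have h' : t ≠ pvTop hd.1 := fun hh => h hh.symm
      simp [PySem.Dict.getD_insert, h', h]

-- guarded fold with a decidable-prop guard = fold over the filtered list
theorem pv_foldl_guardP {alpha beta : Type} (c : alpha -> Prop) [DecidablePred c] (g : beta -> alpha -> beta)
    (l : List alpha) (d : beta) :
    l.foldl (fun d x => if c x then g d x else d) d
      = (l.filter (fun x => decide (c x))).foldl g d := by
  induction l generalizing d with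
  | nil => rfl
  | cons hd tl ih =>
    by_cases h : c hd <;> simp [h, ih]

-- the whole programs (stated in the ports' shapes, pvTop abbreviating the top segment)
theorem pv_main (items : List (String × String)) (existing : List String) :
    pvGoA items
      (items.foldl (fun kd (pv : String × String) =>
        let parts := pvSplitSlash pv.1
        if parts.length < 2 then kd
        else if pv.2 != "added" then PySem.Set.add kd ((PySem.List.pyGet? parts 0).getD "") else kd)
      (existing.foldl (fun kd p =>
        let stripped := pvRstripSlash p
        if PySem.Str.isIn "/" stripped then kd else PySem.Set.add kd stripped) PySem.Set.empty)) =
    ((items.foldl (fun (d : PySem.Dict String Bool) (pv : String × String) =>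
        if 1 < (pvSplitSlash pv.1).length then
          PySem.Dict.insert d (pvTop pv.1) (PySem.Dict.getD d (pvTop pv.1) true && pv.2 == "added")
        else d) PySem.Dict.empty).items.any
      (fun kv => !(PySem.Set.contains (PySem.Set.ofList ((existing.filter
          (fun p => !(PySem.Str.isIn "/" (pvRstripSlash p)))).map pvRstripSlash)) kv.1) && kv.2)) := by
  rw [pv_foldl_guardP (c := fun pv : String × String => 1 < (pvSplitSlash pv.1).length)
        (g := fun (d : PySem.Dict String Bool) (pv : String × String) =>
          PySem.Dict.insert d (pvTop pv.1) (PySem.Dict.getD d (pvTop pv.1) true && pv.2 == "added"))]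
  rw [Bool.eq_iff_iff, pvGoA_iff]
  set Lf := items.filter (fun pv : String × String => decide (1 < (pvSplitSlash pv.1).length)) with hLf
  set D := Lf.foldl (fun (d : PySem.Dict String Bool) (pv : String × String) =>
      PySem.Dict.insert d (pvTop pv.1) (PySem.Dict.getD d (pvTop pv.1) true && pv.2 == "added"))
      PySem.Dict.empty with hD
  have hnodup : D.keys.Nodup := by
    rw [hD]
    exact PySem.Dict.nodup_keys_foldl_insert_key Lf (fun pv => pvTop pv.1) _ _ (by simp)
  have hkeys : ∀ t : String, t ∈ D.keys ↔ ∃ pv ∈ Lf, pvTop pv.1 = t := by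
    intro t
    rw [hD, PySem.Dict.keys_foldl_insert_key]
    simp [PySem.Set.mem_update, eq_comm]
  have hgetD : ∀ t : String, D.getD t true
      = (Lf.filter (fun pv : String × String => pvTop pv.1 == t)).all (fun pv => pv.2 == "added") := by
    intro t
    rw [hD, pv_getD_verdict]
    simp
  have hmemLf : ∀ pv : String × String, pv ∈ Lf ↔ pv ∈ items ∧ 2 ≤ (pvSplitSlash pv.1).length := by
    intro pv
    rw [hLf, List.mem_filter]
    simp [Nat.lt_iff_add_one_le]
  constructor
  · rintro ⟨pv, hm, hlen, hadd, hnk⟩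
    rw [pv_mem_knownChanged, pv_mem_knownExisting] at hnk
    rw [List.any_eq_true]
    have hkey : pvTop pv.1 ∈ D.keys := (hkeys _).mpr ⟨pv, (hmemLf pv).mpr ⟨hm, hlen⟩, rfl⟩
    refine ⟨(pvTop pv.1, D.getD (pvTop pv.1) true), ?_, ?_⟩
    · rw [PySem.Dict.items_eq_map_keys D hnodup true]
      exact List.mem_map.mpr ⟨pvTop pv.1, hkey, rfl⟩
    · simp only [Bool.and_eq_true, Bool.not_eq_true']
      refine ⟨?_, ?_⟩
      · rw [Bool.eq_false_iff]
        intro hc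
        rw [PySem.Set.contains_iff, pv_mem_existingTops] at hc
        exact hnk (Or.inl (Or.inr hc))
      · rw [hgetD, List.all_eq_true]
        rintro qv hq
        rw [List.mem_filter] at hq
        obtain ⟨hqLf, hqt⟩ := hq
        obtain ⟨hqm, hqlen⟩ := (hmemLf qv).mp hqLf
        by_contra hne
        simp only [beq_iff_eq] at hqt hne
        exact hnk (Or.inr ⟨qv, hqm, hqlen, hne, hqt.symm⟩)
  · rw [List.any_eq_true]
    rintro ⟨kv, hkm, hkv⟩
    rw [PySem.Dict.items_eq_map_keys D hnodup true] at hkm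
    obtain ⟨t, htk, rfl⟩ := List.mem_map.mp hkm
    simp only [Bool.and_eq_true, Bool.not_eq_true'] at hkv
    obtain ⟨hex, hval⟩ := hkv
    obtain ⟨pv, hpvLf, hpvt⟩ := (hkeys t).mp htk
    obtain ⟨hm, hlen⟩ := (hmemLf pv).mp hpvLf
    rw [hgetD, List.all_eq_true] at hval
    have hadd : pv.2 = "added" := by
      have := hval pv (List.mem_filter.mpr ⟨hpvLf, by simp [hpvt]⟩)
      simpa using this
    refine ⟨pv, hm, hlen, hadd, ?_⟩
    rw [pv_mem_knownChanged, pv_mem_knownExisting]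
    rintro ((h | ⟨p, hp, hc, heq⟩) | ⟨qv, hqm, hqlen, hqadd, hqt⟩)
    · simp [PySem.Set.empty] at h
    · have hmem : t ∈ PySem.Set.ofList ((existing.filter
          (fun p => !(PySem.Str.isIn "/" (pvRstripSlash p)))).map pvRstripSlash) :=
        (pv_mem_existingTops existing t).mpr ⟨p, hp, hc, hpvt.symm.trans heq⟩
      rw [← PySem.Set.contains_iff] at hmem
      rw [hex] at hmem
      exact Bool.false_ne_true hmem
    · have hqLf : qv ∈ Lf := (hmemLf qv).mpr ⟨hqm, hqlen⟩
      have := hval qv (List.mem_filter.mpr ⟨hqLf, by simp [← hqt, hpvt]⟩)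
      exact hqadd (by simpa using this)

-- ===== VERDICT (by name: the statement is the Claim_ definition above) =====
theorem has_new_top_level_dir_py_spec : Claim_equal_has_new_top_level_dir_py := by
  intro changed existing _
  unfold Spec_has_new_top_level_dir_py has_new_top_level_dir_py has_new_top_level_dir_py_alt
  exact pv_main (PySem.Dict.ofList changed).items existing
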